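-- pv_equiv track=rewrite | github.com/dpatel76/SynapseDTE2 | app/services/streaming_profiler_service.py | _calculate_id_ranges
-- ===== SOURCE A (Python) =====
-- from typing import Dict, List, Optional, AsyncIterator, Any, Tuple
--
-- def _calculate_id_ranges(
--
--     total_records: int,
--     partition_count: int
-- ) -> List[Tuple[int, int]]:
--     """Calculate ID ranges for partitioning"""
--     records_per_partition = total_records // partition_count
--     ranges = []
--
--     for i in range(partition_count):
--         start = i * records_per_partition
--         end = start + records_per_partition - 1
--         if i == partition_count - 1:
--             end = total_records - 1
--         ranges.append((start, end))
--
--     return ranges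
-- ===== SOURCE B (Python) =====
-- def _calculate_id_ranges(total_records, partition_count):
--     records_per_partition = total_records // partition_count
--     rev_ranges = []
--     end = total_records - 1
--     i = partition_count - 1
--     while i >= 0:
--         start = i * records_per_partition
--         rev_ranges.append((start, end))
--         end = start - 1
--         i -= 1
--     rev_ranges.reverse()
--     return rev_ranges
-- ===== Notes on version B (the rewrite author's own statement) =====
-- stated objective: alternative
-- what changed: Iterates over partitions in reverse, threading each partition's end down from the next partition's start, so the last-partition conditional disappears into the loop's initial end value; the list is built back-to-front and reversed once.
import Mathlib
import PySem

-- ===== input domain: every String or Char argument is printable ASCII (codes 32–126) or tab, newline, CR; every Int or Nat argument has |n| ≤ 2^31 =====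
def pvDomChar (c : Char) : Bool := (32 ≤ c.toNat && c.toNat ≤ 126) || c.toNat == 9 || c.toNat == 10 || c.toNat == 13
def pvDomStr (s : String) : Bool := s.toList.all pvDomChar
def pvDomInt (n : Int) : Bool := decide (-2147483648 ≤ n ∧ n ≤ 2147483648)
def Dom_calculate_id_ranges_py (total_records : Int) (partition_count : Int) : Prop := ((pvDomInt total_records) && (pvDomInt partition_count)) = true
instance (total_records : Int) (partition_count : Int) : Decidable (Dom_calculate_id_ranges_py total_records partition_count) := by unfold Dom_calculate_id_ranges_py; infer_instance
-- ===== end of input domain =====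

-- B walks the partitions in reverse, threading each end down from the next start, so A's
-- last-partition conditional becomes the loop's initial end value (objective: alternative).

-- ===== PORT A =====
def calculate_id_ranges_py (total_records : Int) (partition_count : Int) : List (Int × Int) :=
  let records_per_partition := PySem.Int.floordiv total_records partition_count
  (PySem.List.pyRange 0 partition_count 1).foldl
    (fun ranges i =>
      let start := i * records_per_partition
      let e := start + records_per_partition - 1
      let e := if i = partition_count - 1 then total_records - 1 else e
      ranges ++ [(start, e)]) []

-- ===== PORT B =====
-- B's while loop: i counts down from partition_count-1, e is threaded as start-1.
def calculate_id_ranges_alt_loop (rpp : Int) (i : Int) (e : Int) (acc : List (Int × Int)) : List (Int × Int) :=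
  if _h : 0 ≤ i then
    calculate_id_ranges_alt_loop rpp (i - 1) (i * rpp - 1) (acc ++ [(i * rpp, e)])
  else acc
termination_by (i + 1).toNat
decreasing_by omega

def calculate_id_ranges_py_alt (total_records : Int) (partition_count : Int) : List (Int × Int) :=
  let records_per_partition := PySem.Int.floordiv total_records partition_count
  (calculate_id_ranges_alt_loop records_per_partition (partition_count - 1) (total_records - 1) []).reverse

-- ===== PRECONDITION & SPEC =====
-- Pre_ excludes partition_count = 0, on which Python A raises ZeroDivisionError (B raises there too).
def Pre_calculate_id_ranges_py (total_records : Int) (partition_count : Int) : Prop := partition_count ≠ 0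
instance (total_records : Int) (partition_count : Int) : Decidable (Pre_calculate_id_ranges_py total_records partition_count) := by unfold Pre_calculate_id_ranges_py; infer_instance
def pvWitness_calculate_id_ranges_py : Int × Int := (10, 3)

def Spec_calculate_id_ranges_py (total_records : Int) (partition_count : Int) (out : List (Int × Int)) : Prop := out = calculate_id_ranges_py_alt total_records partition_count
instance (total_records : Int) (partition_count : Int) (out : List (Int × Int)) : Decidable (Spec_calculate_id_ranges_py total_records partition_count out) := by unfold Spec_calculate_id_ranges_py; infer_instance

-- ===== CLAIM =====
def Claim_equal_calculate_id_ranges_py : Prop := ∀ (total_records : Int) (partition_count : Int), Dom_calculate_id_ranges_py total_records partition_count → Pre_calculate_id_ranges_py total_records partition_count → Spec_calculate_id_ranges_py total_records partition_count (calculate_id_ranges_py total_records partition_count)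

-- ===== LEMMAS AND PROOFS =====

-- A's append-accumulator loop is a map.
theorem foldl_append_map {α β : Type} (f : α → β) :
    ∀ (l : List α) (acc : List β),
      l.foldl (fun acc i => acc ++ [f i]) acc = acc ++ l.map f := by
  intro l
  induction l with
  | nil => intro acc; simp
  | cons x xs ih => intro acc; simp [List.foldl, ih]

-- B's countdown loop produces the reverse of the per-index map.
theorem alt_loop_eq (rpp : Int) :
    ∀ (n : Nat) (i e : Int) (acc : List (Int × Int)), i + 1 ≤ (n : Int) →
      calculate_id_ranges_alt_loop rpp i e acc
        = acc ++ ((PySem.List.pyRange 0 (i + 1) 1).map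
            (fun j => (j * rpp, if j = i then e else j * rpp + rpp - 1))).reverse := by
  intro n
  induction n with
  | zero =>
    intro i e acc h
    rw [calculate_id_ranges_alt_loop]
    have hi : ¬ 0 ≤ i := by omega
    rw [PySem.List.pyRange_one_eq_nil (by omega)]
    simp [hi]
  | succ m ih =>
    intro i e acc h
    rw [calculate_id_ranges_alt_loop]
    by_cases hi : 0 ≤ i
    · simp only [hi, dif_pos]
      rw [ih (i - 1) (i * rpp - 1) (acc ++ [(i * rpp, e)]) (by omega)]
      have h1 : i - 1 + 1 = i := by ring
      rw [h1, PySem.List.pyRange_one_succ_right hi]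
      have hmap : (PySem.List.pyRange 0 i 1).map
            (fun j => (j * rpp, if j = i - 1 then i * rpp - 1 else j * rpp + rpp - 1))
          = (PySem.List.pyRange 0 i 1).map
            (fun j => (j * rpp, if j = i then e else j * rpp + rpp - 1)) := by
        apply List.map_congr_left
        intro j hj
        rw [PySem.List.mem_pyRange_one] at hj
        have hne : ¬ j = i := by omega
        by_cases hje : j = i - 1
        · subst hje; simp [hne]; ring
        · simp [hne, hje]
      rw [hmap]
      simp
    · simp only [hi]
      rw [PySem.List.pyRange_one_eq_nil (by omega)]
      simp

theorem calculate_id_ranges_eq (total_records partition_count : Int)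
    (hd : Dom_calculate_id_ranges_py total_records partition_count) :
    calculate_id_ranges_py total_records partition_count
      = calculate_id_ranges_py_alt total_records partition_count := by
  unfold calculate_id_ranges_py calculate_id_ranges_py_alt
  dsimp only
  rw [foldl_append_map]
  have hb : -2147483648 ≤ partition_count := by
    unfold Dom_calculate_id_ranges_py pvDomInt at hd
    simp only [Bool.and_eq_true, decide_eq_true_eq] at hd
    exact hd.2.1
  rw [alt_loop_eq _ partition_count.toNat (partition_count - 1) (total_records - 1) [] (by omega)]
  have hpc : partition_count - 1 + 1 = partition_count := by ring
  rw [hpc]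
  simp

-- ===== VERDICT =====
theorem calculate_id_ranges_py_spec : Claim_equal_calculate_id_ranges_py := by
  intro t pc hd _
  unfold Spec_calculate_id_ranges_py
  exact calculate_id_ranges_eq t pc hd
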